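-- pv_equiv track=rewrite | github.com/UBC-UrbanDataLab/Classifying-End-Use-MDS2020 | code/clustering.py | make_categorical_list
-- ===== SOURCE A (Python) =====
-- def make_categorical_list(cont_idxs, num_predictors):
--     """Function to generate a list of booleans to identify which columns are categorical and which aren't
--     Args:
--         cont_idxs (list): list of indexes that are continuous
--         num_predictors (int): number of predictor variables
--
--     Returns:
--         is_cat (list): a list of boolean values indicating which columns are categorical (True) and which are continuous (False)
--     """
--     if type(cont_idxs)==int: cont_idxs = [cont_idxs]
--     is_cat = []
--     for i in range(num_predictors):
--         if i in cont_idxs: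
--             is_cat.append(False)
--         else:
--             is_cat.append(True)
--     return is_cat
-- ===== SOURCE B (Python) =====
-- def make_categorical_list(cont_idxs, num_predictors):
--     """Same result as A: start all-categorical, mark the continuous positions."""
--     if type(cont_idxs) == int: cont_idxs = [cont_idxs]
--     is_cat = [True] * num_predictors
--     for idx in cont_idxs:
--         if 0 <= idx < num_predictors:
--             is_cat[idx] = False
--     return is_cat
-- ===== Notes on version B (the rewrite author's own statement) =====
-- stated objective: faster
-- what changed: Instead of scanning every column and testing list membership (O(n*m)), B allocates an all-True list once and marks each in-range continuous index False in one pass over cont_idxs (O(n+m)).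
import Mathlib
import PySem

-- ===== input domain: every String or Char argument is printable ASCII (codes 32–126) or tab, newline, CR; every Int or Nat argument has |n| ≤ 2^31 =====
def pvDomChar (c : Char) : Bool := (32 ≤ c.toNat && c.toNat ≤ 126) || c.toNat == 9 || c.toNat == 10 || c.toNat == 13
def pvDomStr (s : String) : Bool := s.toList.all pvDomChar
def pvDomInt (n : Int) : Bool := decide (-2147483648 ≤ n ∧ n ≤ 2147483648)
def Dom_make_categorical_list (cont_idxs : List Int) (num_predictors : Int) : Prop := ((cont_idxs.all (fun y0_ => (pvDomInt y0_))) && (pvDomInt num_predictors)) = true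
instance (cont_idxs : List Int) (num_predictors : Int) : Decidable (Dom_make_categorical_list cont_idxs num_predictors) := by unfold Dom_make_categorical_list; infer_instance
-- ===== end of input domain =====

-- B replaces A's per-column membership scan by a one-pass marking of the continuous
-- indexes into a preallocated all-True list (asymptotically faster, O(n+m) vs O(n*m)).

-- ===== PORT A =====
-- A scans i in range(num_predictors), appending False if i ∈ cont_idxs else True.
def make_categorical_list (cont_idxs : List Int) (num_predictors : Int) : List Bool :=
  (PySem.List.pyRange 0 num_predictors 1).foldl
    (fun is_cat i => if cont_idxs.contains i then is_cat ++ [false] else is_cat ++ [true]) []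

-- ===== PORT B =====
-- B starts from [True] * num_predictors and sets each in-range continuous index to False.
def make_categorical_list_alt (cont_idxs : List Int) (num_predictors : Int) : List Bool :=
  cont_idxs.foldl
    (fun is_cat idx => if 0 ≤ idx ∧ idx < num_predictors then is_cat.set idx.toNat false else is_cat)
    (List.replicate num_predictors.toNat true)

-- ===== PRECONDITION & SPEC =====
def Spec_make_categorical_list (cont_idxs : List Int) (num_predictors : Int) (out : List Bool) : Prop := out = make_categorical_list_alt cont_idxs num_predictors
instance (cont_idxs : List Int) (num_predictors : Int) (out : List Bool) : Decidable (Spec_make_categorical_list cont_idxs num_predictors out) := by unfold Spec_make_categorical_list; infer_instance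

-- ===== CLAIM (what is proved, stated in full; the proofs are below) =====
def Claim_equal_make_categorical_list : Prop := ∀ (cont_idxs : List Int) (num_predictors : Int), Dom_make_categorical_list cont_idxs num_predictors → Spec_make_categorical_list cont_idxs num_predictors (make_categorical_list cont_idxs num_predictors)

-- ===== LEMMAS AND PROOFS =====

-- A's append-fold is a map over the range.
theorem foldl_append_ite_eq_map (g : Int → Bool) :
    ∀ (l : List Int) (init : List Bool),
      l.foldl (fun acc i => if g i then acc ++ [false] else acc ++ [true]) init
        = init ++ l.map (fun i => if g i then false else true) := by
  intro l
  induction l with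
  | nil => simp
  | cons x xs ih =>
    intro init
    by_cases hx : g x <;> simp [List.foldl_cons, hx, ih]

-- B's marking fold preserves length.
theorem foldB_length (n : Int) :
    ∀ (idxs : List Int) (l : List Bool),
      (idxs.foldl (fun acc idx => if 0 ≤ idx ∧ idx < n then acc.set idx.toNat false else acc) l).length
        = l.length := by
  intro idxs
  induction idxs with
  | nil => intro l; rfl
  | cons x xs ih =>
    intro l
    by_cases hx : 0 ≤ x ∧ x < n <;> simp [List.foldl_cons, hx, ih]

-- Element j of B's marking fold: False iff j occurs in idxs, else the old value.
theorem foldB_getElem (n : Int) :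
    ∀ (idxs : List Int) (l : List Bool) (j : Nat) (hj : j < l.length)
      (hln : (l.length : Int) ≤ n)
      (hj' : j < (idxs.foldl (fun acc idx => if 0 ≤ idx ∧ idx < n then acc.set idx.toNat false else acc) l).length),
      (idxs.foldl (fun acc idx => if 0 ≤ idx ∧ idx < n then acc.set idx.toNat false else acc) l)[j]'hj'
        = if idxs.contains (j : Int) then false else l[j]'hj := by
  intro idxs
  induction idxs with
  | nil => intro l j hj hln hj'; simp
  | cons x xs ih =>
    intro l j hj hln hj'
    simp only [List.foldl_cons]
    by_cases hxj : x = (j : Int)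
    · subst hxj
      have hg : (0 ≤ (j : Int) ∧ (j : Int) < n) := by
        constructor
        · exact Int.natCast_nonneg j
        · exact lt_of_lt_of_le (by exact_mod_cast hj) hln
      simp only [hg, and_self, if_true]
      have hset : j < (l.set (Int.toNat j) false).length := by simpa using hj
      have := ih (l.set (Int.toNat (j : Int)) false) j (by simpa using hj)
        (by simpa using hln) (by simpa [foldB_length] using hset)
      rw [this]
      simp
    · by_cases hg : 0 ≤ x ∧ x < n
      · simp only [hg, and_self, if_true]
        have hset : j < (l.set x.toNat false).length := by simpa using hj
        have := ih (l.set x.toNat false) j hset (by simpa using hln)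
          (by simpa [foldB_length] using hset)
        rw [this]
        have hne : x.toNat ≠ j := by
          intro h; apply hxj; omega
        have hji : (↑j : Int) ≠ x := fun h => hxj h.symm
        simp [hne, hji]
      · simp only [hg, if_false]
        rw [ih l j hj hln (by simpa [foldB_length] using hj)]
        have hji : (↑j : Int) ≠ x := fun h => hxj h.symm
        simp [hji]

-- ===== VERDICT (by name: the statement is the Claim_ definition above) =====
theorem make_categorical_list_spec : Claim_equal_make_categorical_list := by
  unfold Claim_equal_make_categorical_list
  intro cont_idxs n _
  unfold Spec_make_categorical_list make_categorical_list make_categorical_list_alt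
  rw [foldl_append_ite_eq_map (fun i => cont_idxs.contains i)]
  apply List.ext_getElem
  · simp [foldB_length, PySem.List.length_pyRange_one]
  · intro j h1 h2
    have hjlen : j < (List.replicate n.toNat true).length := by
      simpa [foldB_length] using h2
    have hjn : j < n.toNat := by simpa using hjlen
    rw [foldB_getElem n cont_idxs (List.replicate n.toNat true) j hjlen
      (by simp; omega) h2]
    simp only [List.nil_append, List.getElem_map, PySem.List.getElem_pyRange_one]
    simp [List.getElem_replicate]
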